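-- pv_equiv track=rewrite | github.com/OpenFAST/openfast | zmq_coupling_tests/zmq_python_toolbox/pyFAST/tools/curve_fitting.py | set_common_keys
-- ===== SOURCE A (Python) =====
-- def set_common_keys(dict_target, dict_source):
--     """ Set a dictionary using another one, missing keys in source dictionary are reported"""
--     keys_missing=[]
--     for k in dict_target.keys():
--         if k in dict_source.keys():
--             dict_target[k]=dict_source[k]
--         else:
--             keys_missing.append(k)
--     return dict_target, keys_missing
-- ===== SOURCE B (Python) =====
-- def set_common_keys(dict_target, dict_source):
--     """ Set a dictionary using another one, missing keys in source dictionary are reported"""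
--     for k, v in dict_source.items():
--         if k in dict_target:
--             dict_target[k] = v
--     keys_missing = [k for k in dict_target if k not in dict_source]
--     return dict_target, keys_missing
-- ===== Notes on version B (the rewrite author's own statement) =====
-- stated objective: alternative
-- what changed: B reverses the traversal: it iterates dict_source's items and writes each into dict_target when the key already exists there (correct because assigning an existing key preserves dict order), then collects the missing keys in a separate pass over dict_target; A instead makes a single pass over dict_target testing each key against dict_source.
import Mathlib
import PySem

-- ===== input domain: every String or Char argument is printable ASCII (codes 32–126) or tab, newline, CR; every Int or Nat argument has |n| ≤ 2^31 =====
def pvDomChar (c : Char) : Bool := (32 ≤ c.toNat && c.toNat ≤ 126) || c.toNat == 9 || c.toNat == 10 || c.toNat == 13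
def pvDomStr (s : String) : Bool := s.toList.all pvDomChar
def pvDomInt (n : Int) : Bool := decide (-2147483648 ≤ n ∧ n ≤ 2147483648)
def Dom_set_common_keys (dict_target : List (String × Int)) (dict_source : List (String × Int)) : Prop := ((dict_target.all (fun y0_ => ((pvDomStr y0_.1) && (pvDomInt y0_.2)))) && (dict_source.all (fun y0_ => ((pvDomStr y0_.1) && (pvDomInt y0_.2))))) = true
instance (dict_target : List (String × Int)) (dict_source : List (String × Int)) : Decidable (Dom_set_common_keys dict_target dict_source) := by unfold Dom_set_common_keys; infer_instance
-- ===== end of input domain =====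

-- B reverses the traversal: it iterates dict_source, writing into dict_target where the key
-- exists, then collects the missing keys in a second pass over dict_target (objective:
-- alternative decomposition). Both Pythons mutate dict_target in place and return that same
-- object; the ports model the returned value.

-- ===== PORT A =====
-- one loop over target keys: copy from source if present, else record missing
def set_common_keys (dict_target : List (String × Int)) (dict_source : List (String × Int)) : (List (String × Int)) × List String :=
  dict_target.foldl
    (fun (acc : List (String × Int) × List String) kv =>
      if (dict_source.lookup kv.1).isSome then
        (acc.1 ++ [(kv.1, (dict_source.lookup kv.1).getD 0)], acc.2)
      else
        (acc.1 ++ [kv], acc.2 ++ [kv.1]))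
    ([], [])

-- ===== PORT B =====
-- loop over source items: if the key is in the (current) target, assign it there in place
-- ('dict_target[k] = v' on a dict replaces the unique entry for k keeping its position;
--  modeled exactly by mapping over the association list); then the missing keys in a
-- separate pass over dict_target
def set_common_keys_alt (dict_target : List (String × Int)) (dict_source : List (String × Int)) : (List (String × Int)) × List String :=
  let updated :=
    dict_source.foldl
      (fun (acc : List (String × Int)) kv =>
        if (acc.lookup kv.1).isSome then
          acc.map (fun p => if p.1 == kv.1 then (p.1, kv.2) else p)
        else acc)
      dict_target
  (updated, (updated.map Prod.fst).filter (fun k => !((dict_source.map Prod.fst).contains k)))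

-- ===== PRECONDITION & SPEC =====
-- Pre_ excludes source association lists with duplicate keys: they do not represent a Python
-- dict (the real arguments are dicts, whose keys are unique), and on them A would keep the
-- first occurrence's value while B keeps the last — a corner no dict input can reach.
def Pre_set_common_keys (dict_target : List (String × Int)) (dict_source : List (String × Int)) : Prop :=
  (dict_source.map Prod.fst).Nodup
instance (dict_target : List (String × Int)) (dict_source : List (String × Int)) : Decidable (Pre_set_common_keys dict_target dict_source) := by unfold Pre_set_common_keys; infer_instance

def pvWitness_set_common_keys : (List (String × Int)) × (List (String × Int)) :=
  ([("a", 1), ("b", 2)], [("a", 3), ("c", 4)])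

def Spec_set_common_keys (dict_target : List (String × Int)) (dict_source : List (String × Int)) (out : (List (String × Int)) × List String) : Prop := out = set_common_keys_alt dict_target dict_source
instance (dict_target : List (String × Int)) (dict_source : List (String × Int)) (out : (List (String × Int)) × List String) : Decidable (Spec_set_common_keys dict_target dict_source out) := by unfold Spec_set_common_keys; infer_instance

-- ===== CLAIM (what is proved, stated in full; the proofs are below) =====
def Claim_equal_set_common_keys : Prop := ∀ (dict_target : List (String × Int)) (dict_source : List (String × Int)), Dom_set_common_keys dict_target dict_source → Pre_set_common_keys dict_target dict_source → Spec_set_common_keys dict_target dict_source (set_common_keys dict_target dict_source)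

-- ===== LEMMAS AND PROOFS =====

-- A's fold with general accumulator = map + filter over the target
theorem foldA_eq (s : List (String × Int)) :
    ∀ (t : List (String × Int)) (acc : List (String × Int) × List String),
    t.foldl
      (fun (acc : List (String × Int) × List String) kv =>
        if (s.lookup kv.1).isSome then
          (acc.1 ++ [(kv.1, (s.lookup kv.1).getD 0)], acc.2)
        else
          (acc.1 ++ [kv], acc.2 ++ [kv.1]))
      acc
    = (acc.1 ++ t.map (fun kv => if (s.lookup kv.1).isSome then (kv.1, (s.lookup kv.1).getD 0) else kv),
       acc.2 ++ (t.map Prod.fst).filter (fun k => !((s.lookup k).isSome))) := by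
  intro t
  induction t with
  | nil => intro acc; simp
  | cons kv rest ih =>
    intro acc
    simp only [List.foldl_cons, List.map_cons, List.filter_cons]
    by_cases h : (s.lookup kv.1).isSome
    · simp [h, ih]
    · simp [h, ih]

theorem lookup_isSome_iff_mem (s : List (String × Int)) (k : String) :
    (s.lookup k).isSome = true ↔ k ∈ s.map Prod.fst := by
  induction s with
  | nil => simp
  | cons p rest ih =>
    by_cases h : p.1 = k
    · simp [List.lookup, h]
    · have hb : (k == p.1) = false := by simp [Ne.symm h]
      simp [List.lookup, hb, ih]
      exact fun hk => absurd hk.symm h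

-- B's fold over a duplicate-free source = map over the target with first-match lookup
theorem foldB_eq :
    ∀ (s t : List (String × Int)), (s.map Prod.fst).Nodup →
    s.foldl
      (fun (acc : List (String × Int)) kv =>
        if (acc.lookup kv.1).isSome then
          acc.map (fun p => if p.1 == kv.1 then (p.1, kv.2) else p)
        else acc)
      t
    = t.map (fun kv => if (s.lookup kv.1).isSome then (kv.1, (s.lookup kv.1).getD 0) else kv) := by
  intro s
  induction s with
  | nil => intro t _; simp
  | cons kv rest ih =>
    intro t hnd
    simp only [List.map_cons, List.nodup_cons] at hnd
    obtain ⟨hk, hrest⟩ := hnd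
    simp only [List.foldl_cons]
    by_cases h : (t.lookup kv.1).isSome
    · rw [if_pos h, ih _ hrest, List.map_map]
      apply List.map_congr_left
      intro p _
      simp only [Function.comp]
      by_cases hp : p.1 = kv.1
      · simp [List.lookup, hp]
        intro x hx
        exact absurd (List.mem_map_of_mem hx) hk
      · have hb : (p.1 == kv.1) = false := by simp [hp]
        simp only [List.lookup, hb]
        rfl
    · rw [if_neg h, ih _ hrest]
      apply List.map_congr_left
      intro p hp
      have hpk : p.1 ≠ kv.1 := by
        intro he
        exact h ((lookup_isSome_iff_mem t kv.1).mpr (he ▸ List.mem_map_of_mem hp))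
      have hb : (p.1 == kv.1) = false := by simp [hpk]
      simp only [List.lookup, hb]

theorem set_common_keys_spec : Claim_equal_set_common_keys := by
  intro t s _ hpre
  show set_common_keys t s = set_common_keys_alt t s
  rw [set_common_keys, foldA_eq]
  simp only [set_common_keys_alt, List.nil_append, Prod.mk.injEq]
  rw [foldB_eq s t hpre]
  refine ⟨rfl, ?_⟩
  have hfst : (t.map (fun kv =>
      if (s.lookup kv.1).isSome then (kv.1, (s.lookup kv.1).getD 0) else kv)).map Prod.fst
      = t.map Prod.fst := by
    rw [List.map_map]
    apply List.map_congr_left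
    intro kv _
    simp only [Function.comp]
    split <;> rfl
  rw [hfst]
  apply List.filter_congr
  intro k _
  have h1 : (s.map Prod.fst).contains k = (s.lookup k).isSome := by
    rw [Bool.eq_iff_iff, List.contains_iff_mem, lookup_isSome_iff_mem]
  rw [h1]
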